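-- pv_equiv track=rewrite | github.com/AbhiramK01/LabSense | app/algorithms/question_assignment.py | _greedy_assignment
-- ===== SOURCE A (Python) =====
-- from typing import List, Set, Tuple
--
-- def _greedy_assignment(all_combinations: List[Tuple[int, ...]], num_students: int, questions_per_student: int) -> List[List[int]]:
--     """
--     Greedy fallback assignment when backtracking fails.
--     Tries to minimize adjacency conflicts.
--     """
--     assignments = []
--     used_combinations = set()
--
--     for student_index in range(num_students):
--         best_combination = None
--         min_conflicts = float('inf')
--
--         # Find the combination with minimum adjacency conflicts
--         for combination in all_combinations:
--             if combination in used_combinations: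
--                 continue
--
--             # Count potential conflicts
--             conflicts = 0
--             if student_index > 0:
--                 prev_assignment = tuple(sorted(assignments[student_index - 1]))
--                 if tuple(sorted(combination)) == prev_assignment:
--                     conflicts += 1
--
--             if conflicts < min_conflicts:
--                 min_conflicts = conflicts
--                 best_combination = combination
--
--         # Assign the best combination found
--         if best_combination:
--             assignments.append(list(best_combination))
--             used_combinations.add(best_combination)
--         else:
--             # Last resort: assign any unused combination
--             for combination in all_combinations:
--                 if combination not in used_combinations:
--                     assignments.append(list(combination))
--                     used_combinations.add(combination)
--                     break
--
--     return assignments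
-- ===== SOURCE B (Python) =====
-- def _greedy_assignment(all_combinations, num_students, questions_per_student):
--     # Single left-to-right pass over the distinct combinations with a deferred-run
--     # queue: combinations whose sorted tuple equals the previous assignment are
--     # parked and revisited as soon as the previous key changes; no per-student
--     # rescan and no used-set.
--     key = lambda c: tuple(sorted(c))
--     order = list(dict.fromkeys(all_combinations))
--     assignments = []
--     deferred = []      # parked combinations; they all share one sorted key
--     qi = 0             # consumed prefix of `deferred`
--     i = 0              # consumed prefix of `order`
--     prev = None
--     for _ in range(num_students):
--         if qi < len(deferred) and key(deferred[qi]) != prev: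
--             pick = deferred[qi]
--             qi += 1
--         else:
--             pick = None
--             while i < len(order):
--                 c = order[i]
--                 i += 1
--                 if key(c) == prev:
--                     deferred.append(c)
--                 else:
--                     pick = c
--                     break
--             if pick is None:
--                 if qi < len(deferred):
--                     pick = deferred[qi]
--                     qi += 1
--                 else:
--                     break
--         assignments.append(list(pick))
--         prev = key(pick)
--     return assignments
-- ===== Notes on version B (the rewrite author's own statement) =====
-- stated objective: faster
-- what changed: A rescans the whole combination list for every student, sorting every candidate and tracking a min-conflict counter over a used-set; B makes one left-to-right pass over the distinct combinations with a deferred-run queue: a combination whose sorted tuple equals the previous assignment is parked and revisited once the previous key changes, so each combination is examined O(1) times and no used-set or rescan exists.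
import Mathlib
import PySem

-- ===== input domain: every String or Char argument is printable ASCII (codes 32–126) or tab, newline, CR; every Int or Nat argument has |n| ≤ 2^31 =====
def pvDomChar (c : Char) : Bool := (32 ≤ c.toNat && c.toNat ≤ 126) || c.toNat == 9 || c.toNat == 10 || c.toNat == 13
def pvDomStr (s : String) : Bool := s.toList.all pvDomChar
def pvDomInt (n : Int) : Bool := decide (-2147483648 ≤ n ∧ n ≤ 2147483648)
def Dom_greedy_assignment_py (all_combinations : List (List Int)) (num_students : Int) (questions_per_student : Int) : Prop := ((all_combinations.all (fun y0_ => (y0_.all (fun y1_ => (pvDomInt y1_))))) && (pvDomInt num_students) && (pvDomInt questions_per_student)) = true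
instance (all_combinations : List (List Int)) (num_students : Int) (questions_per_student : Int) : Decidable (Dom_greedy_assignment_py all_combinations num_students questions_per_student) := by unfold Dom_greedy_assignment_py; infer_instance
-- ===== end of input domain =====

-- B replaces A's per-student rescan of the whole combination list (with a min-conflict
-- counter over a used-set) by ONE left-to-right pass over the distinct combinations with
-- a deferred-run queue for combinations repeating the previous key (objective: faster).

-- ===== PORT A =====
-- tuple(sorted(l))
def pvSortedI (l : List Int) : List Int := PySem.List.sorted l (fun x => x) false

-- the `conflicts` counter computed for one candidate combination
-- (assignments[student_index - 1] is always in range when this code is reached — the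
-- .getD [] default is never used; see the comment in pvAStep)
def pvConflicts (assignments : List (List Int)) (student_index : Int) (combination : List Int) : Int :=
  if student_index > 0 then
    let prev := pvSortedI ((PySem.List.pyGet? assignments (student_index - 1)).getD [])
    if pvSortedI combination = prev then 1 else 0
  else 0

-- one iteration of A's inner `for combination in all_combinations` loop;
-- state = (best_combination, min_conflicts) with `none` for float('inf')
def pvBestFold (used assignments : List (List Int)) (student_index : Int)
    (st : Option (List Int) × Option Int) (combination : List Int) :
    Option (List Int) × Option Int :=
  if PySem.Set.contains used combination then st
  else
    let conflicts := pvConflicts assignments student_index combination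
    if (match st.2 with | none => true | some m => conflicts < m) then
      (some combination, some conflicts)
    else st

-- A's `else` branch: assign the first unused combination, if any
def pvLastResort (all_combinations assignments used : List (List Int)) :
    List (List Int) × List (List Int) :=
  match all_combinations.find? (fun c => !(PySem.Set.contains used c)) with
  | some c => (assignments ++ [c], PySem.Set.add used c)
  | none => (assignments, used)

-- one iteration of A's outer `for student_index in range(num_students)` loop
def pvAStep (all_combinations : List (List Int)) (st : List (List Int) × List (List Int))
    (student_index : Int) : List (List Int) × List (List Int) :=
  let assignments := st.1
  let used := st.2
  let best := (all_combinations.foldl (pvBestFold used assignments student_index) (none, none)).1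
  match best with
  | some b =>
    if b.isEmpty then pvLastResort all_combinations assignments used  -- `if best_combination:` is false for the empty combination
    else (assignments ++ [b], PySem.Set.add used b)
  | none => pvLastResort all_combinations assignments used

def greedy_assignment_py (all_combinations : List (List Int)) (num_students : Int)
    (questions_per_student : Int) : List (List Int) :=
  ((PySem.List.pyRange 0 num_students 1).foldl (pvAStep all_combinations) ([], [])).1

-- ===== PORT B =====
-- B's inner `while i < len(order)` loop, consuming the unread suffix of `order`
-- (the Python index i); returns (combinations appended to `deferred`, pick, new suffix)
def pvScan (prev : Option (List Int)) : List (List Int) →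
    List (List Int) × Option (List Int) × List (List Int)
  | [] => ([], none, [])
  | c :: t =>
    if some (pvSortedI c) = prev then
      let r := pvScan prev t
      (c :: r.1, r.2.1, r.2.2)
    else ([], some c, t)

-- B's `for _ in range(num_students)` loop; Q is the unread suffix deferred[qi:],
-- rest the unread suffix order[i:]
def pvQLoop : Nat → List (List Int) → List (List Int) → List (List Int) →
    Option (List Int) → List (List Int)
  | 0, _, _, ass, _ => ass
  | Nat.succ k, Q, rest, ass, prev =>
    if Q ≠ [] ∧ some (pvSortedI (Q.headD [])) ≠ prev then
      let q := Q.headD []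
      pvQLoop k Q.tail rest (ass ++ [q]) (some (pvSortedI q))
    else
      let s := pvScan prev rest
      match Q ++ s.1 with
      | qf :: Qt =>
        match s.2.1 with
        | some c => pvQLoop k (qf :: Qt) s.2.2 (ass ++ [c]) (some (pvSortedI c))
        | none => pvQLoop k Qt s.2.2 (ass ++ [qf]) (some (pvSortedI qf))  -- qi < len(deferred)
      | [] =>
        match s.2.1 with
        | some c => pvQLoop k [] s.2.2 (ass ++ [c]) (some (pvSortedI c))
        | none => ass  -- break

def greedy_assignment_py_alt (all_combinations : List (List Int)) (num_students : Int)
    (questions_per_student : Int) : List (List Int) :=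
  pvQLoop num_students.toNat [] (PySem.List.dedup all_combinations) [] none

-- ===== PRECONDITION & SPEC =====
-- Pre_ excludes inputs whose combination list contains the empty combination: a
-- combination of zero questions is malformed for this assignment task, and there A's
-- truthiness test `if best_combination:` treats a chosen empty combination as "nothing
-- found", so its result is an accident of the implementation; B assigns it normally.
def Pre_greedy_assignment_py (all_combinations : List (List Int)) (num_students : Int)
    (questions_per_student : Int) : Prop := [] ∉ all_combinations
instance (all_combinations : List (List Int)) (num_students : Int) (questions_per_student : Int) : Decidable (Pre_greedy_assignment_py all_combinations num_students questions_per_student) := by unfold Pre_greedy_assignment_py; infer_instance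

def pvWitness_greedy_assignment_py : List (List Int) × Int × Int := ([[1, 2], [2, 1], [3]], 2, 2)

def Spec_greedy_assignment_py (all_combinations : List (List Int)) (num_students : Int) (questions_per_student : Int) (out : List (List Int)) : Prop := out = greedy_assignment_py_alt all_combinations num_students questions_per_student
instance (all_combinations : List (List Int)) (num_students : Int) (questions_per_student : Int) (out : List (List Int)) : Decidable (Spec_greedy_assignment_py all_combinations num_students questions_per_student out) := by unfold Spec_greedy_assignment_py; infer_instance

-- ===== CLAIM (what is proved, stated in full; the proofs are below) =====
def Claim_equal_greedy_assignment_py : Prop := ∀ (all_combinations : List (List Int)) (num_students : Int) (questions_per_student : Int), Dom_greedy_assignment_py all_combinations num_students questions_per_student → Pre_greedy_assignment_py all_combinations num_students questions_per_student → Spec_greedy_assignment_py all_combinations num_students questions_per_student (greedy_assignment_py all_combinations num_students questions_per_student)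


-- ===== LEMMAS AND PROOFS =====

-- proof-only intermediate model: an ordered pool of still-available distinct
-- combinations from which the earliest non-conflicting one is removed each round
def pvPoolLoop : Nat → List (List Int) × List (List Int) × Option (List Int) →
    List (List Int) × List (List Int) × Option (List Int)
  | 0, st => st
  | Nat.succ k, (avail, assignments, prev) =>
    if avail = [] then (avail, assignments, prev)
    else
      let pick :=
        match avail.find? (fun c => decide (some (pvSortedI c) ≠ prev)) with
        | some c => c
        | none => avail.headD []
      pvPoolLoop k ((PySem.List.remove? avail pick).getD avail, assignments ++ [pick],
        some (pvSortedI pick))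

-- proof-only abbreviations for the pool state as a function of the assignment list so far
def pvAvail (all_combinations out : List (List Int)) : List (List Int) :=
  (PySem.List.dedup all_combinations).filter (fun c => !(PySem.Set.contains out c))

def pvPrev (out : List (List Int)) : Option (List Int) := out.getLast?.map pvSortedI

def pvPick (all_combinations out : List (List Int)) : List Int :=
  match (pvAvail all_combinations out).find? (fun c => decide (some (pvSortedI c) ≠ pvPrev out)) with
  | some c => c
  | none => (pvAvail all_combinations out).headD []

-- A's conflicts counter is 0 or 1
lemma pvConflicts_cases (ass : List (List Int)) (i : Int) (c : List Int) :
    pvConflicts ass i c = 0 ∨ pvConflicts ass i c = 1 := by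
  unfold pvConflicts
  split_ifs <;> simp <;> try tauto

-- the inner fold is absorbed once min_conflicts = 0
lemma foldBest_zero (used ass : List (List Int)) (i : Int) (b : List Int) :
    ∀ (l : List (List Int)),
      l.foldl (pvBestFold used ass i) (some b, some 0) = (some b, some 0) := by
  intro l
  induction l with
  | nil => rfl
  | cons c t ih =>
    have h := pvConflicts_cases ass i c
    simp only [List.foldl_cons, pvBestFold]
    split_ifs with h1 h2
    · exact ih
    · exfalso; rcases h with h | h <;> simp [h] at h2
    · exact ih

-- the inner fold from min_conflicts = 1 picks the first unused zero-conflict combination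
lemma foldBest_one (used ass : List (List Int)) (i : Int) (b : List Int) :
    ∀ (l : List (List Int)),
      l.foldl (pvBestFold used ass i) (some b, some 1) =
        match l.find? (fun c => !(PySem.Set.contains used c) && (pvConflicts ass i c == 0)) with
        | some c => (some c, some 0)
        | none => (some b, some 1) := by
  intro l
  induction l generalizing b with
  | nil => rfl
  | cons c t ih =>
    rw [List.foldl_cons, List.find?_cons]
    by_cases hc : c ∈ used
    · have hstep : pvBestFold used ass i (some b, some 1) c = (some b, some 1) := by
        simp [pvBestFold, hc]
      have hpred : (!PySem.Set.contains used c && (pvConflicts ass i c == 0)) = false := by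
        simp [hc]
      simp only [hstep, hpred]
      exact ih b
    · rcases pvConflicts_cases ass i c with h0 | h1
      · have hstep : pvBestFold used ass i (some b, some 1) c = (some c, some 0) := by
          simp [pvBestFold, hc, h0]
        have hpred : (!PySem.Set.contains used c && (pvConflicts ass i c == 0)) = true := by
          simp [hc, h0]
        simp only [hstep, hpred]
        exact foldBest_zero used ass i c t
      · have hstep : pvBestFold used ass i (some b, some 1) c = (some b, some 1) := by
          simp [pvBestFold, hc, h1]
        have hpred : (!PySem.Set.contains used c && (pvConflicts ass i c == 0)) = false := by
          simp [hc, h1]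
        simp only [hstep, hpred]
        exact ih b

-- characterisation of A's whole inner loop (best_combination)
lemma foldBest_none (used ass : List (List Int)) (i : Int) :
    ∀ (l : List (List Int)),
      (l.foldl (pvBestFold used ass i) (none, none)).1 =
        match l.find? (fun c => !(PySem.Set.contains used c) && (pvConflicts ass i c == 0)) with
        | some c => some c
        | none => l.find? (fun c => !(PySem.Set.contains used c)) := by
  intro l
  induction l with
  | nil => rfl
  | cons c t ih =>
    rw [List.foldl_cons, List.find?_cons, List.find?_cons]
    by_cases hc : c ∈ used
    · have hstep : pvBestFold used ass i (none, none) c = (none, none) := by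
        simp [pvBestFold, hc]
      have hpred : (!PySem.Set.contains used c && (pvConflicts ass i c == 0)) = false := by
        simp [hc]
      have hpred2 : (!PySem.Set.contains used c) = false := by simp [hc]
      simp only [hstep, hpred2]
      exact ih
    · rcases pvConflicts_cases ass i c with h0 | h1
      · have hstep : pvBestFold used ass i (none, none) c = (some c, some 0) := by
          simp [pvBestFold, hc, h0]
        have hpred : (!PySem.Set.contains used c && (pvConflicts ass i c == 0)) = true := by
          simp [hc, h0]
        simp only [hstep, hpred]
        rw [foldBest_zero]
      · have hstep : pvBestFold used ass i (none, none) c = (some c, some 1) := by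
          simp [pvBestFold, hc, h1]
        have hpred : (!PySem.Set.contains used c && (pvConflicts ass i c == 0)) = false := by
          simp [hc, h1]
        have hpred2 : (!PySem.Set.contains used c) = true := by simp [hc]
        simp only [hstep, hpred2]
        rw [foldBest_one]
        rcases hf : t.find?
            (fun c => !(PySem.Set.contains used c) && (pvConflicts ass i c == 0)) with _ | d <;>
          simp [h1]

-- find? is unchanged by Python-style deduplication
lemma find?_discard (p : List Int → Bool) (x : List Int) (hx : p x = false)
    (s : List (List Int)) : (PySem.Set.discard s x).find? p = s.find? p := by
  show (s.filter (fun y => y != x)).find? p = s.find? p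
  rw [List.find?_filter]
  have hpe : (fun a => decide ((a != x) = true ∧ p a = true)) = p := by
    funext a
    by_cases ha : a = x
    · subst ha; simp [hx]
    · by_cases hp : p a <;> simp [ha, hp]
  rw [hpe]

lemma find?_dedup (p : List Int → Bool) :
    ∀ (l : List (List Int)), (PySem.List.dedup l).find? p = l.find? p := by
  intro l
  induction l with
  | nil => rfl
  | cons x t ih =>
    rw [PySem.List.dedup_eq_ofList] at *
    rw [PySem.Set.ofList_cons, List.find?_cons]
    by_cases hp : p x
    · simp [hp]
    · simp only [hp]
      rw [find?_discard p x (by simp [hp]), ih]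
      simp [hp]

-- B's skip test coincides with "A's conflicts counter is zero", at index = out.length
lemma pred_eq (out : List (List Int)) (c : List Int) :
    (decide (some (pvSortedI c) ≠ pvPrev out)) =
      (pvConflicts out (out.length : Int) c == 0) := by
  rcases List.eq_nil_or_concat out with h | ⟨t, p, h⟩
  · subst h; simp [pvPrev, pvConflicts]
  · subst h
    simp only [List.concat_eq_append]
    have hlen : ((t ++ [p]).length : Int) > 0 := by simp
    have hidx : (((t ++ [p]).length : Int) - 1) = ((t.length : Nat) : Int) := by simp
    have hget : PySem.List.pyGet? (t ++ [p]) (((t ++ [p]).length : Int) - 1) = some p := by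
      rw [hidx, PySem.List.pyGet?_natCast]
      simp
    rw [pvConflicts, if_pos hlen]
    simp only [hget, Option.getD_some, pvPrev, List.getLast?_concat, Option.map_some]
    by_cases he : pvSortedI c = pvSortedI p <;> simp [he]

-- when the available pool is empty, one whole A iteration is a no-op
lemma stepA_id (all_combinations out : List (List Int))
    (h : pvAvail all_combinations out = []) (j : Int) :
    pvAStep all_combinations (out, out) j = (out, out) := by
  have hall : ∀ c ∈ all_combinations, c ∈ out := by
    intro c hc
    have hmem : c ∈ PySem.List.dedup all_combinations := by
      rw [PySem.List.dedup_eq_ofList]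
      exact (PySem.Set.mem_ofList all_combinations c).2 hc
    have := (List.filter_eq_nil_iff).1 h c hmem
    simpa using this
  have hfind : all_combinations.find? (fun c => !(PySem.Set.contains out c)) = none := by
    rw [List.find?_eq_none]; intro c hc; simp [hall c hc]
  have hfind2 : all_combinations.find?
      (fun c => !(PySem.Set.contains out c) && (pvConflicts out j c == 0)) = none := by
    rw [List.find?_eq_none]; intro c hc; simp [hall c hc]
  simp only [pvAStep, foldBest_none, hfind, hfind2, pvLastResort]

-- A's fold is a no-op forever once the pool is empty
lemma foldA_id (all_combinations out : List (List Int))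
    (h : pvAvail all_combinations out = []) :
    ∀ (l : List Nat),
      (l.foldl (fun st (j : Nat) => pvAStep all_combinations st (j : Int)) (out, out)) = (out, out) := by
  intro l
  induction l with
  | nil => rfl
  | cons j t ih => simpa [stepA_id all_combinations out h (j : Int)] using ih

-- the pool after one more assignment
lemma avail_succ (all_combinations out : List (List Int)) (p : List Int) :
    pvAvail all_combinations (out ++ [p]) = (pvAvail all_combinations out).erase p := by
  have hnd : (pvAvail all_combinations out).Nodup := by
    rw [pvAvail, PySem.List.dedup_eq_ofList]
    exact (PySem.Set.nodup_ofList all_combinations).filter _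
  rw [hnd.erase_eq_filter, pvAvail, pvAvail, List.filter_filter]
  apply List.filter_congr
  intro c _
  by_cases h1 : c ∈ out <;> by_cases h2 : c = p <;>
    simp [PySem.Set.contains_eq_listContains, List.mem_append, h1, h2]

-- one whole A iteration (pool nonempty) = one pool-model iteration
lemma stepA_eq (all_combinations out : List (List Int)) (hpre : [] ∉ all_combinations)
    (hav : pvAvail all_combinations out ≠ []) :
    pvAStep all_combinations (out, out) (out.length : Int) =
      (out ++ [pvPick all_combinations out], out ++ [pvPick all_combinations out]) := by
  have hchain :
      (pvAvail all_combinations out).find? (fun c => decide (some (pvSortedI c) ≠ pvPrev out)) =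
        all_combinations.find?
          (fun c => !(PySem.Set.contains out c) && (pvConflicts out (out.length : Int) c == 0)) := by
    rw [pvAvail, List.find?_filter, find?_dedup]
    congr 1
    funext c
    rw [pred_eq out c]
    by_cases h1 : c ∈ out <;>
      by_cases h2 : (pvConflicts out (out.length : Int) c == 0) = true <;> simp [h1, h2]
  have hmem_all : ∀ c ∈ pvAvail all_combinations out,
      c ∈ all_combinations ∧ (PySem.Set.contains out c) = false := by
    intro c hc
    rw [pvAvail, List.mem_filter] at hc
    refine ⟨?_, by simpa using hc.2⟩
    have := hc.1
    rw [PySem.List.dedup_eq_ofList] at this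
    exact (PySem.Set.mem_ofList all_combinations c).1 this
  rcases hfp : (pvAvail all_combinations out).find?
      (fun c => decide (some (pvSortedI c) ≠ pvPrev out)) with _ | c
  · -- every available combination conflicts: fall back to the first available one
    have hhead : all_combinations.find? (fun c => !(PySem.Set.contains out c)) =
        some ((pvAvail all_combinations out).headD []) := by
      rw [← find?_dedup, ← List.head?_filter]
      show (pvAvail all_combinations out).head? = _
      rcases hl : pvAvail all_combinations out with _ | ⟨h, t⟩
      · exact absurd hl hav
      · rfl
    have hh : (pvAvail all_combinations out).headD [] ∈ pvAvail all_combinations out := by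
      rcases hl : pvAvail all_combinations out with _ | ⟨h, t⟩
      · exact absurd hl hav
      · simp
    have hne : (pvAvail all_combinations out).headD [] ≠ [] := by
      intro h0; exact hpre (h0 ▸ (hmem_all _ hh).1)
    have hnm : (pvAvail all_combinations out).headD [] ∉ out := by
      intro hmm
      have h2 := (hmem_all _ hh).2
      rw [(PySem.Set.contains_iff out _).2 hmm] at h2
      simp at h2
    simp only [pvAStep, foldBest_none, ← hchain, hfp, hhead, List.isEmpty_iff, hne,
      pvPick, PySem.Set.add_of_not_mem hnm]
    simp
  · -- the earliest non-conflicting available combination is assigned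
    have hc := List.mem_of_find?_eq_some hfp
    have hne : c ≠ [] := fun h0 => hpre (h0 ▸ (hmem_all _ hc).1)
    have hnm : c ∉ out := by
      intro hmm
      have h2 := (hmem_all _ hc).2
      rw [(PySem.Set.contains_iff out _).2 hmm] at h2
      simp at h2
    simp only [pvAStep, foldBest_none, ← hchain, hfp, List.isEmpty_iff, if_neg hne,
      pvPick, PySem.Set.add_of_not_mem hnm]

-- pvPick is drawn from the pool
lemma pick_mem (all_combinations out : List (List Int))
    (hav : pvAvail all_combinations out ≠ []) :
    pvPick all_combinations out ∈ pvAvail all_combinations out := by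
  rw [pvPick]
  rcases hfp : (pvAvail all_combinations out).find?
      (fun c => decide (some (pvSortedI c) ≠ pvPrev out)) with _ | c
  · rcases hl : pvAvail all_combinations out with _ | ⟨h, t⟩
    · exact absurd hl hav
    · simp
  · exact List.mem_of_find?_eq_some hfp

-- A's loop = the pool model
lemma loop_eq (all_combinations : List (List Int)) (hpre : [] ∉ all_combinations) :
    ∀ (k i : Nat) (out : List (List Int)),
      (pvAvail all_combinations out ≠ [] → out.length = i) →
      ((List.range' i k).foldl
          (fun st (j : Nat) => pvAStep all_combinations st (j : Int)) (out, out)).1 =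
        (pvPoolLoop k (pvAvail all_combinations out, out, pvPrev out)).2.1 := by
  intro k
  induction k with
  | zero => intro i out _; rfl
  | succ k ih =>
    intro i out hlen
    by_cases hav : pvAvail all_combinations out = []
    · rw [hav]
      rw [foldA_id all_combinations out hav]
      simp [pvPoolLoop]
    · have hi : out.length = i := hlen hav
      have hpm := pick_mem all_combinations out hav
      set p := pvPick all_combinations out with hp
      have hstep := stepA_eq all_combinations out hpre hav
      rw [List.range'_succ, List.foldl_cons]
      rw [← hi] at *
      rw [hstep]
      have hbstep : pvPoolLoop (k+1) (pvAvail all_combinations out, out, pvPrev out) =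
          pvPoolLoop k ((pvAvail all_combinations out).erase p, out ++ [p],
            some (pvSortedI p)) := by
        rcases hl : pvAvail all_combinations out with _ | ⟨h, t⟩
        · exact absurd hl hav
        · show (if h :: t = [] then _ else _) = _
          rw [if_neg (by simp)]
          rw [← hl]
          have : (PySem.List.remove? (pvAvail all_combinations out) p).getD
              (pvAvail all_combinations out) = (pvAvail all_combinations out).erase p := by
            rw [PySem.List.remove?_eq_some_erase _ p hpm]; rfl
          simp only [pvPick] at hp
          simp only []
          rw [← hp, this]
      rw [hbstep, ← avail_succ all_combinations out p]
      have hprev : some (pvSortedI p) = pvPrev (out ++ [p]) := by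
        simp [pvPrev]
      rw [hprev]
      exact ih (out.length + 1) (out ++ [p]) (fun _ => by simp)

-- the scan decomposes its input: skipped prefix (all with the previous key), then
-- either a pick with a different key followed by the rest, or nothing
lemma pvScan_decomp (prev : Option (List Int)) : ∀ (rest : List (List Int)),
    (∀ a ∈ (pvScan prev rest).1, some (pvSortedI a) = prev) ∧
    (match (pvScan prev rest).2.1 with
     | some c => rest = (pvScan prev rest).1 ++ c :: (pvScan prev rest).2.2 ∧
         some (pvSortedI c) ≠ prev
     | none => rest = (pvScan prev rest).1 ∧ (pvScan prev rest).2.2 = []) := by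
  intro rest
  induction rest with
  | nil => exact ⟨by simp [pvScan], by simp [pvScan]⟩
  | cons c t ih =>
    by_cases hc : some (pvSortedI c) = prev
    · have hs : pvScan prev (c :: t) =
          ((c :: (pvScan prev t).1, (pvScan prev t).2.1, (pvScan prev t).2.2)) := by
        simp [pvScan, hc]
      refine ⟨?_, ?_⟩
      · rw [hs]; intro a ha
        rcases List.mem_cons.1 ha with h | h
        · subst h; exact hc
        · exact ih.1 a h
      · rw [hs]
        have h2 := ih.2
        rcases hf : (pvScan prev t).2.1 with _ | d <;> rw [hf] at h2 <;> simp only []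
        · exact ⟨by rw [← h2.1], h2.2⟩
        · exact ⟨by rw [List.cons_append, ← h2.1], h2.2⟩
    · have hs : pvScan prev (c :: t) = ([], some c, t) := by simp [pvScan, hc]
      rw [hs]
      exact ⟨by simp, by simp [hc]⟩

-- the pool model = B's queue model, under the invariant pool = Q ++ rest with Q
-- a run of combinations sharing one sorted key
lemma pool_eq_queue : ∀ (k : Nat) (Q rest out : List (List Int)) (prev : Option (List Int)),
    (∀ a ∈ Q, ∀ b ∈ Q, pvSortedI a = pvSortedI b) →
    (pvPoolLoop k (Q ++ rest, out, prev)).2.1 = pvQLoop k Q rest out prev := by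
  intro k
  induction k with
  | zero => intro Q rest out prev _; rfl
  | succ k ih =>
    intro Q rest out prev hQ
    by_cases hQb : Q ≠ [] ∧ some (pvSortedI (Q.headD [])) ≠ prev
    · -- pick the front of the deferred queue
      rcases hQ' : Q with _ | ⟨q, Qt⟩
      · exact absurd (hQ' ▸ hQb.1) (by simp)
      subst hQ'
      have hq : some (pvSortedI q) ≠ prev := by simpa using hQb.2
      have hrm : (PySem.List.remove? (q :: (Qt ++ rest)) q).getD (q :: (Qt ++ rest)) =
          Qt ++ rest := by
        rw [PySem.List.remove?_eq_some_erase _ q (by simp)]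
        simp [List.erase_cons_head]
      have hstep : pvPoolLoop (k+1) (q :: (Qt ++ rest), out, prev) =
          pvPoolLoop k (Qt ++ rest, out ++ [q], some (pvSortedI q)) := by
        rw [pvPoolLoop, if_neg (by simp)]
        have hfq : (q :: (Qt ++ rest)).find? (fun c => decide (some (pvSortedI c) ≠ prev)) =
            some q := by
          simp [hq]
        simp only [hfq, hrm]
      show (pvPoolLoop (k+1) (q :: (Qt ++ rest), out, prev)).2.1 = _
      rw [pvQLoop, if_pos hQb, hstep]
      simp only [List.headD_cons, List.tail_cons]
      exact ih Qt rest (out ++ [q]) (some (pvSortedI q))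
        (fun a ha b hb => hQ a (List.mem_cons_of_mem _ ha) b (List.mem_cons_of_mem _ hb))
    · -- every deferred combination repeats prev (or none is deferred): scan `rest`
      have hQall : ∀ a ∈ Q, some (pvSortedI a) = prev := by
        intro a ha
        rcases hQ' : Q with _ | ⟨q, Qt⟩
        · subst hQ'; simp at ha
        · subst hQ'
          have hqe : some (pvSortedI q) = prev := by
            by_contra hne
            exact hQb ⟨by simp, by simpa using hne⟩
          have := hQ a ha q (by simp)
          rw [← hqe, this]
      have hdec := pvScan_decomp prev rest
      rw [pvQLoop, if_neg hQb]
      rcases hf : (pvScan prev rest).2.1 with _ | c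
      · -- no different-key combination left: pool = Q ++ skipped, all repeating prev
        rw [hf] at hdec
        obtain ⟨hsk, ⟨hrest, hrr⟩⟩ := hdec
        have hpool : Q ++ rest = Q ++ (pvScan prev rest).1 := by rw [← hrest]
        rcases hqf : Q ++ (pvScan prev rest).1 with _ | ⟨qf, Qt⟩
        · -- pool empty: both stop
          simp only [hf]
          rw [hpool, hqf, pvPoolLoop]
          simp
        · -- fallback: pick the pool head
          have hallprev : ∀ a ∈ Q ++ (pvScan prev rest).1, some (pvSortedI a) = prev := by
            intro a ha
            rcases List.mem_append.1 ha with h | h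
            · exact hQall a h
            · exact hsk a h
          have hfind2 : (qf :: Qt).find? (fun c => decide (some (pvSortedI c) ≠ prev)) =
              none := by
            rw [← hqf, List.find?_eq_none]
            intro a ha
            simp [hallprev a ha]
          have hrm : (PySem.List.remove? (qf :: Qt) qf).getD (qf :: Qt) = Qt := by
            rw [PySem.List.remove?_eq_some_erase _ qf (by simp)]
            simp [List.erase_cons_head]
          have hstep : pvPoolLoop (k+1) (qf :: Qt, out, prev) =
              pvPoolLoop k (Qt, out ++ [qf], some (pvSortedI qf)) := by
            rw [pvPoolLoop, if_neg (by simp)]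
            simp only [hfind2, List.headD_cons, hrm]
          simp only [hf]
          rw [hpool, hqf, hstep, hrr]
          have := ih Qt [] (out ++ [qf]) (some (pvSortedI qf))
            (fun a ha b hb => by
              have h1 := hallprev a (hqf ▸ List.mem_cons_of_mem _ ha)
              have h2 := hallprev b (hqf ▸ List.mem_cons_of_mem _ hb)
              rw [← h2] at h1
              exact Option.some.inj h1)
          rw [List.append_nil] at this
          exact this
      · -- pick the first different-key combination found in `rest`
        rw [hf] at hdec
        obtain ⟨hsk, ⟨hrest, hcne⟩⟩ := hdec
        have hallprev : ∀ a ∈ Q ++ (pvScan prev rest).1, some (pvSortedI a) = prev := by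
          intro a ha
          rcases List.mem_append.1 ha with h | h
          · exact hQall a h
          · exact hsk a h
        have hpool : Q ++ rest =
            (Q ++ (pvScan prev rest).1) ++ c :: (pvScan prev rest).2.2 := by
          rw [List.append_assoc, ← hrest]
        have hfind : ((Q ++ rest).find? (fun c => decide (some (pvSortedI c) ≠ prev))) =
            some c := by
          rw [hpool, List.find?_append]
          have h1 : ((Q ++ (pvScan prev rest).1).find?
              (fun c => decide (some (pvSortedI c) ≠ prev))) = none := by
            rw [List.find?_eq_none]
            intro a ha
            simp [hallprev a ha]
          rw [h1]
          simp [hcne]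
        have hcnm : c ∉ Q ++ (pvScan prev rest).1 := by
          intro hmm
          exact hcne (hallprev c hmm)
        have hrm : (PySem.List.remove? (Q ++ rest) c).getD (Q ++ rest) =
            (Q ++ (pvScan prev rest).1) ++ (pvScan prev rest).2.2 := by
          rw [PySem.List.remove?_eq_some_erase _ c (by rw [hpool]; simp)]
          simp only [Option.getD_some]
          rw [hpool, List.erase_append_right _ hcnm, List.erase_cons_head]
        have hpne : Q ++ rest ≠ [] := by rw [hpool]; simp
        rw [pvPoolLoop, if_neg hpne, hfind]
        simp only [hf]
        rw [hrm]
        have := ih (Q ++ (pvScan prev rest).1) (pvScan prev rest).2.2 (out ++ [c])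
          (some (pvSortedI c))
          (fun a ha b hb => by
            have h1 := hallprev a ha
            have h2 := hallprev b hb
            rw [← h2] at h1
            exact Option.some.inj h1)
        rw [this]
        rcases hqf : Q ++ (pvScan prev rest).1 with _ | ⟨qf, Qt⟩ <;> rfl

-- ===== VERDICT (by name: the statement is the Claim_ definition above) =====
theorem greedy_assignment_py_spec : Claim_equal_greedy_assignment_py := by
  intro all_combinations num_students questions_per_student _ hpre
  unfold Spec_greedy_assignment_py greedy_assignment_py greedy_assignment_py_alt
  rw [PySem.List.pyRange_one, List.foldl_map]
  simp only [zero_add, sub_zero]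
  rw [List.range_eq_range']
  have hav0 : pvAvail all_combinations [] = PySem.List.dedup all_combinations := by
    rw [pvAvail]
    apply List.filter_eq_self.2
    intro c _; rfl
  have h1 := loop_eq all_combinations hpre num_students.toNat 0 [] (fun _ => rfl)
  rw [hav0] at h1
  rw [h1]
  show (pvPoolLoop num_students.toNat ([] ++ PySem.List.dedup all_combinations, [], none)).2.1 = _
  exact pool_eq_queue num_students.toNat [] (PySem.List.dedup all_combinations) [] none
    (by simp)
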